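-- pv_equiv track=rewrite | github.com/HIQC-SEU/ZernFDA | Ours/Ours.py | generate_s_terms_list
-- ===== SOURCE A (Python) =====
-- def generate_s_terms_list(
-- 	s
-- ):
-- 	# 定义结果列表
-- 	list_nm = []
-- 	list_mn = []
--
-- 	# 计数
-- 	gen_cnt = 0
--
-- 	# 记录最大的n和最大的m
-- 	max_n = 0
-- 	max_m = 0
-- 	min_m = 0
--
-- 	# 遍历
-- 	for n in range(s):
-- 		for m in range(-n,n + 1):
-- 			# 如果n-m为奇数,跳过
-- 			if (n-m) % 2 == 1:
-- 				continue
--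
-- 			# 添加
-- 			list_nm.append([n,m])
--
-- 			# 判断添加
-- 			max_n = max(n,max_n)
-- 			max_m = max(m,max_m)
-- 			min_m = min(m,min_m)
--
-- 			# 计数
-- 			gen_cnt = gen_cnt + 1
--
-- 			# 如果计数超过
-- 			if gen_cnt > s - 1:
-- 				# 中断
-- 				break
--
-- 		# 如果计数超过
-- 		if gen_cnt > s - 1:
-- 			# 清零
-- 			gen_cnt = 0
--
-- 			# 中断
-- 			break
--
-- 	# 遍历
-- 	for m in range(min_m,max_m+1):
-- 		for n in range(abs(m),max_n+1):
-- 			# 如果n-m为奇数,跳过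
-- 			if (n-m) % 2 == 1:
-- 				continue
--
-- 			# 判断是否存在
-- 			if [n,m] not in list_nm:
-- 				continue
--
-- 			# 添加
-- 			list_mn.append([m,n])
--
-- 			# 计数
-- 			gen_cnt = gen_cnt + 1
--
-- 			# 如果计数超过
-- 			if gen_cnt > s - 1:
-- 				# 中断
-- 				break
--
-- 		# 如果计数超过
-- 		if gen_cnt > s - 1:
-- 			# 清零
-- 			gen_cnt = 0
--
-- 			# 中断
-- 			break
--
-- 	# 返回
-- 	return list_nm, list_mn
-- ===== SOURCE B (Python) =====
-- def generate_s_terms_list(s):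
--     # first phase: the first s Zernike pairs, n ascending, m ascending over same-parity values
--     list_nm = []
--     for n in range(s):
--         for m in range(-n, n + 1, 2):
--             list_nm.append([n, m])
--             if len(list_nm) == s:
--                 break
--         if len(list_nm) == s:
--             break
--     # second phase: the same pairs reordered by (m, n), with no bounding-box rescan
--     list_mn = [[m, n] for n, m in sorted(list_nm, key=lambda p: (p[1], p[0]))]
--     return list_nm, list_mn
-- ===== Notes on version B (the rewrite author's own statement) =====
-- stated objective: faster
-- what changed: The second phase's bounding-box rescan with a linear 'not in list_nm' membership test per cell is replaced by one stable sort of the already-collected pairs keyed on (m,n); the first phase steps m directly over same-parity values instead of testing parity, and drops the counter/max/min bookkeeping.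
import Mathlib
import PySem

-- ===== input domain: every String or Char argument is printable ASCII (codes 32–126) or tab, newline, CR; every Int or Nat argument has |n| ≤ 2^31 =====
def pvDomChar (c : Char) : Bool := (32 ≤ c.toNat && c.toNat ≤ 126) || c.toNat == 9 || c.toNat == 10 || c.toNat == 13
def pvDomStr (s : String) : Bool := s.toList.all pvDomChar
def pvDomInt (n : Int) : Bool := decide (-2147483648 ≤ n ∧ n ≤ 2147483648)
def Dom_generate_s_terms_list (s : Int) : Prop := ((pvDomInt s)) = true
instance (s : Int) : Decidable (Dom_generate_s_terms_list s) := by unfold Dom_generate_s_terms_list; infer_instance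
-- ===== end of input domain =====

-- B replaces A's second-phase bounding-box rescan (a linear membership test per cell) by one
-- stable sort of the collected pairs keyed on (m,n); objective: faster.

-- ===== PORT A =====
-- inner `for m in range(-n, n+1)` loop of phase 1; state = (list_nm, gen_cnt, max_n, max_m, min_m)
def aPhase1Inner (s n : Int) : List Int → List (List Int) × Int × Int × Int × Int →
    List (List Int) × Int × Int × Int × Int
  | [], st => st
  | m :: ms, (l, c, mxn, mxm, mnm) =>
    if PySem.Int.mod (n - m) 2 = 1 then aPhase1Inner s n ms (l, c, mxn, mxm, mnm)
    else
      let l' := l ++ [[n, m]]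
      let mxn' := max n mxn
      let mxm' := max m mxm
      let mnm' := min m mnm
      let c' := c + 1
      if c' > s - 1 then (l', c', mxn', mxm', mnm')
      else aPhase1Inner s n ms (l', c', mxn', mxm', mnm')

-- outer `for n in range(s)` loop of phase 1 (on break: gen_cnt reset to 0)
def aPhase1 (s : Int) : List Int → List (List Int) × Int × Int × Int × Int →
    List (List Int) × Int × Int × Int × Int
  | [], st => st
  | n :: ns, st =>
    let st' := aPhase1Inner s n (PySem.List.pyRange (-n) (n + 1) 1) st
    if st'.2.1 > s - 1 then (st'.1, 0, st'.2.2) else aPhase1 s ns st'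

-- inner `for n in range(abs(m), max_n+1)` loop of phase 2; state = (list_mn, gen_cnt)
def aPhase2Inner (s m : Int) (lnm : List (List Int)) : List Int → List (List Int) × Int →
    List (List Int) × Int
  | [], st => st
  | n :: ns, (l, c) =>
    if PySem.Int.mod (n - m) 2 = 1 then aPhase2Inner s m lnm ns (l, c)
    else if [n, m] ∉ lnm then aPhase2Inner s m lnm ns (l, c)
    else
      let l' := l ++ [[m, n]]
      let c' := c + 1
      if c' > s - 1 then (l', c') else aPhase2Inner s m lnm ns (l', c')

-- outer `for m in range(min_m, max_m+1)` loop of phase 2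
def aPhase2 (s mxn : Int) (lnm : List (List Int)) : List Int → List (List Int) × Int →
    List (List Int) × Int
  | [], st => st
  | m :: ms, st =>
    let st' := aPhase2Inner s m lnm (PySem.List.pyRange |m| (mxn + 1) 1) st
    if st'.2 > s - 1 then (st'.1, 0) else aPhase2 s mxn lnm ms st'

def generate_s_terms_list (s : Int) : List (List Int) × List (List Int) :=
  let st1 := aPhase1 s (PySem.List.pyRange 0 s 1) ([], 0, 0, 0, 0)
  let list_nm := st1.1
  let gen_cnt := st1.2.1
  let max_n := st1.2.2.1
  let max_m := st1.2.2.2.1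
  let min_m := st1.2.2.2.2
  let st2 := aPhase2 s max_n list_nm (PySem.List.pyRange min_m (max_m + 1) 1) ([], gen_cnt)
  (list_nm, st2.1)

-- ===== PORT B =====
-- inner `for m in range(-n, n+1, 2)` loop, break when len(list_nm) == s
def bRow (s n : Int) : List Int → List (List Int) → List (List Int)
  | [], acc => acc
  | m :: ms, acc =>
    let acc' := acc ++ [[n, m]]
    if (acc'.length : Int) = s then acc' else bRow s n ms acc'

-- outer `for n in range(s)` loop
def bLoop (s : Int) : List Int → List (List Int) → List (List Int)
  | [], acc => acc
  | n :: ns, acc =>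
    let acc' := bRow s n (PySem.List.pyRange (-n) (n + 1) 2) acc
    if (acc'.length : Int) = s then acc' else bLoop s ns acc'

def generate_s_terms_list_alt (s : Int) : List (List Int) × List (List Int) :=
  let list_nm := bLoop s (PySem.List.pyRange 0 s 1) []
  let list_mn :=
    (PySem.List.sorted2 list_nm (fun p => PySem.List.pyGetD p 1 0) (fun p => PySem.List.pyGetD p 0 0)).map
      (fun p => [PySem.List.pyGetD p 1 0, PySem.List.pyGetD p 0 0])
  (list_nm, list_mn)

-- ===== PRECONDITION & SPEC =====
def Spec_generate_s_terms_list (s : Int) (out : List (List Int) × List (List Int)) : Prop := out = generate_s_terms_list_alt s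
instance (s : Int) (out : List (List Int) × List (List Int)) : Decidable (Spec_generate_s_terms_list s out) := by unfold Spec_generate_s_terms_list; infer_instance

-- ===== CLAIM (what is proved, stated in full; the proofs are below) =====
def Claim_equal_generate_s_terms_list : Prop := ∀ (s : Int), Dom_generate_s_terms_list s → Spec_generate_s_terms_list s (generate_s_terms_list s)

-- ===== LEMMAS AND PROOFS =====

-- pairs (n, m) emitted by phase 1, and the box pairs (m, n) scanned by phase 2
def pvPairL (p : Int × Int) : List Int := [p.1, p.2]

def pvFlat (s : Int) : List (Int × Int) :=
  (PySem.List.pyRange 0 s 1).flatMap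
    (fun n => (PySem.List.pyRange (-n) (n + 1) 2).map (fun m => (n, m)))

def pvT (s : Int) : List (Int × Int) := (pvFlat s).take s.toNat

def pvLex (p q : Int × Int) : Prop := p.1 < q.1 ∨ (p.1 = q.1 ∧ p.2 < q.2)

lemma pyRange_nil_of_le {a b : Int} (h : b ≤ a) : PySem.List.pyRange a b 1 = [] := by
  rw [PySem.List.pyRange_one]
  have : (b - a).toNat = 0 := by omega
  simp [this]

lemma range_filter_even (j : Nat) :
    (List.range (2 * j + 1)).filter (fun k => decide (k % 2 = 0)) =
      (List.range (j + 1)).map (fun i => 2 * i) := by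
  induction j with
  | zero => decide
  | succ j ih =>
    have h1 : 2 * (j + 1) + 1 = (2 * j + 1) + 1 + 1 := by omega
    rw [h1, List.range_succ, List.range_succ, List.filter_append, List.filter_append, ih]
    have e1 : (2 * j + 1) % 2 = 1 := by omega
    have e3 : 2 * j + 1 + 1 = 2 * (j + 1) := by omega
    simp [e1, e3]
    rw [List.range_succ, List.range_succ, List.map_append, List.map_append]
    rw [List.range_succ, List.map_append]
    simp

lemma row_filter_eq {n : Int} (h : 0 ≤ n) :
    (PySem.List.pyRange (-n) (n + 1) 1).filter (fun m => decide (¬ PySem.Int.mod (n - m) 2 = 1)) =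
      PySem.List.pyRange (-n) (n + 1) 2 := by
  rw [PySem.List.pyRange_one, List.filter_map, PySem.List.pyRange_of_pos (-n) (n + 1) (by norm_num : (0:Int) < 2)]
  have hc : (n + 1 - -n).toNat = 2 * n.toNat + 1 := by omega
  have hif : (-n < n + 1) = True := by simp; omega
  have hcnt : ((n + 1 - -n + 2 - 1) / 2).toNat = n.toNat + 1 := by omega
  rw [hc]
  simp only [hif, if_true, hcnt]
  have hpred : ((fun m => decide (¬ PySem.Int.mod (n - m) 2 = 1)) ∘ (fun k : Nat => -n + (k : Int))) =
      (fun k : Nat => decide (k % 2 = 0)) := by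
    funext k
    simp only [Function.comp, PySem.Int.mod_eq_emod_of_pos (by norm_num : (0:Int) < 2), decide_eq_decide]
    omega
  rw [hpred, range_filter_even, List.map_map]
  apply List.map_congr_left
  intro i _
  simp [Function.comp]

lemma aPhase1Inner_spec (s n : Int) (ms : List Int) : ∀ (l : List (List Int)) (c a b d : Int), c < s →
    aPhase1Inner s n ms (l, c, a, b, d) =
      (let t := (ms.filter (fun m => decide (¬ PySem.Int.mod (n - m) 2 = 1))).take ((s - c).toNat)
       (l ++ t.map (fun m => [n, m]), c + (t.length : Int),
        t.foldl (fun acc _ => max acc n) a, t.foldl (fun acc m => max acc m) b,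
        t.foldl (fun acc m => min acc m) d)) := by
  induction ms with
  | nil => intro l c a b d hc; simp [aPhase1Inner]
  | cons m ms ih =>
    intro l c a b d hc
    by_cases hp : PySem.Int.mod (n - m) 2 = 1
    · have hpf : (decide (¬PySem.Int.mod (n - m) 2 = 1)) = false := by
        simp only [decide_eq_false_iff_not, not_not]; exact hp
      simp only [aPhase1Inner, if_pos hp]
      rw [ih l c a b d hc]
      simp only [List.filter_cons, hpf, Bool.false_eq_true, if_false]
    · have hpt : (decide (¬PySem.Int.mod (n - m) 2 = 1)) = true := by
        simp only [decide_eq_true_eq]; exact hp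
      have htake : (s - c).toNat = (s - (c + 1)).toNat + 1 := by omega
      by_cases hb : c + 1 > s - 1
      · have h0 : (s - (c + 1)).toNat = 0 := by omega
        simp only [aPhase1Inner, if_neg hp, if_pos hb, List.filter_cons, hpt, if_true, htake, h0,
          List.take_succ_cons, List.take_zero, List.map_cons, List.map_nil, List.length_cons,
          List.length_nil, List.foldl_cons, List.foldl_nil, Prod.mk.injEq]
        refine ⟨trivial, by push_cast; ring, by rw [max_comm n a], by rw [max_comm m b], by rw [min_comm m d]⟩
      · have hc' : c + 1 < s := by omega
        simp only [aPhase1Inner, if_neg hp, if_neg hb]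
        rw [ih (l ++ [[n, m]]) (c + 1) (max n a) (max m b) (min m d) hc']
        simp only [List.filter_cons, hpt, if_true, htake, List.take_succ_cons, List.map_cons,
          List.length_cons, List.foldl_cons, List.append_assoc, List.singleton_append, Prod.mk.injEq]
        refine ⟨trivial, by push_cast; ring, ?_, ?_, ?_⟩
        · rw [max_comm n a]
        · rw [max_comm m b]
        · rw [min_comm m d]

lemma aPhase1_spec (s : Int) (ns : List Int) : ∀ (l : List (List Int)) (c a b d : Int), c < s →
    aPhase1 s ns (l, c, a, b, d) =
      (let t := (ns.flatMap (fun n =>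
          ((PySem.List.pyRange (-n) (n + 1) 1).filter
            (fun m => decide (¬ PySem.Int.mod (n - m) 2 = 1))).map (fun m => (n, m)))).take ((s - c).toNat)
       (l ++ t.map pvPairL, if c + (t.length : Int) = s then 0 else c + (t.length : Int),
        t.foldl (fun acc p => max acc p.1) a, t.foldl (fun acc p => max acc p.2) b,
        t.foldl (fun acc p => min acc p.2) d)) := by
  induction ns with
  | nil =>
    intro l c a b d hc
    simp only [aPhase1, List.flatMap_nil, List.take_nil, List.map_nil, List.append_nil,
      List.length_nil, Nat.cast_zero, add_zero, List.foldl_nil]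
    rw [if_neg (by omega)]
  | cons n ns ih =>
    intro l c a b d hc
    have hspec := aPhase1Inner_spec s n (PySem.List.pyRange (-n) (n + 1) 1) l c a b d hc
    simp only [] at hspec
    simp only [aPhase1, hspec, List.flatMap_cons]
    set F := (PySem.List.pyRange (-n) (n + 1) 1).filter (fun m => decide (¬PySem.Int.mod (n - m) 2 = 1)) with hF
    set k := (s - c).toNat with hk
    have hlen : (F.take k).length = min k F.length := List.length_take
    have hle : (F.take k).length ≤ k := by omega
    by_cases hb : c + ((F.take k).length : Int) > s - 1
    · have heq : c + ((F.take k).length : Int) = s := by omega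
      have hkF : k ≤ F.length := by omega
      have hrest : k - (F.map (fun m => (n, m))).length = 0 := by
        simp only [List.length_map]; omega
      rw [if_pos hb, List.take_append, hrest, List.take_zero, List.append_nil,
        ← List.map_take, List.map_map]
      simp only [List.foldl_map, List.length_map, if_pos heq]
      simp [pvPairL, Function.comp_def]
    · have hlt : c + ((F.take k).length : Int) < s := by omega
      have hFk : F.length ≤ k := by
        by_contra hcon
        have : (F.take k).length = k := by omega
        omega
      have htF : F.take k = F := List.take_of_length_le hFk
      rw [if_neg hb]
      rw [htF] at hlt ⊢
      rw [ih (l ++ F.map fun m => [n, m]) (c + F.length) _ _ _ hlt]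
      have hk' : (s - (c + (F.length : Int))).toNat = k - F.length := by omega
      simp only [List.take_append, List.length_map, ← List.map_take, List.map_map, htF, hk']
      simp only [List.map_append, List.map_map, List.foldl_append, List.foldl_map,
        List.length_append, List.append_assoc, Nat.cast_add, add_assoc, Function.comp_def]
      simp [pvPairL]


lemma aPhase2Inner_spec (s m : Int) (lnm : List (List Int)) (ns : List Int) :
    ∀ (l : List (List Int)) (c : Int), c < s →
    aPhase2Inner s m lnm ns (l, c) =
      (let t := (ns.filter (fun n => decide (¬ PySem.Int.mod (n - m) 2 = 1 ∧ [n, m] ∈ lnm))).take ((s - c).toNat)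
       (l ++ t.map (fun n => [m, n]), c + (t.length : Int))) := by
  induction ns with
  | nil => intro l c hc; simp [aPhase2Inner]
  | cons n ns ih =>
    intro l c hc
    by_cases hp : PySem.Int.mod (n - m) 2 = 1
    · have hpf : (decide (¬PySem.Int.mod (n - m) 2 = 1 ∧ [n, m] ∈ lnm)) = false := by
        simp only [decide_eq_false_iff_not]
        exact fun h => h.1 hp
      simp only [aPhase2Inner, if_pos hp]
      rw [ih l c hc]
      simp only [List.filter_cons, hpf, Bool.false_eq_true, if_false]
    · by_cases hmem : [n, m] ∈ lnm
      · have hpt : (decide (¬PySem.Int.mod (n - m) 2 = 1 ∧ [n, m] ∈ lnm)) = true := by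
          simp only [decide_eq_true_eq]
          exact ⟨hp, hmem⟩
        have htake : (s - c).toNat = (s - (c + 1)).toNat + 1 := by omega
        by_cases hb : c + 1 > s - 1
        · have h0 : (s - (c + 1)).toNat = 0 := by omega
          simp only [aPhase2Inner, if_neg hp, if_neg (not_not_intro hmem), if_pos hb,
            List.filter_cons, hpt, if_true, htake, h0, List.take_succ_cons, List.take_zero,
            List.map_cons, List.map_nil, List.length_cons, List.length_nil, Prod.mk.injEq]
          constructor <;> first | trivial | (push_cast; ring)
        · have hc' : c + 1 < s := by omega
          simp only [aPhase2Inner, if_neg hp, if_neg (not_not_intro hmem), if_neg hb]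
          rw [ih (l ++ [[m, n]]) (c + 1) hc']
          simp only [List.filter_cons, hpt, if_true, htake, List.take_succ_cons, List.map_cons,
            List.length_cons, List.append_assoc, List.singleton_append, Prod.mk.injEq]
          constructor <;> first | trivial | (push_cast; ring)
      · have hpf : (decide (¬PySem.Int.mod (n - m) 2 = 1 ∧ [n, m] ∈ lnm)) = false := by
          simp [hmem]
        simp only [aPhase2Inner, if_neg hp, if_pos hmem]
        rw [ih l c hc]
        simp only [List.filter_cons, hpf, Bool.false_eq_true, if_false]

lemma aPhase2_spec (s mxn : Int) (lnm : List (List Int)) (ms : List Int) :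
    ∀ (l : List (List Int)) (c : Int), c < s →
    aPhase2 s mxn lnm ms (l, c) =
      (let t := (ms.flatMap (fun m =>
          ((PySem.List.pyRange |m| (mxn + 1) 1).filter
            (fun n => decide (¬ PySem.Int.mod (n - m) 2 = 1 ∧ [n, m] ∈ lnm))).map (fun n => (m, n)))).take ((s - c).toNat)
       (l ++ t.map (fun p => [p.1, p.2]),
        if c + (t.length : Int) = s then 0 else c + (t.length : Int))) := by
  induction ms with
  | nil =>
    intro l c hc
    simp only [aPhase2, List.flatMap_nil, List.take_nil, List.map_nil, List.append_nil,
      List.length_nil, Nat.cast_zero, add_zero]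
    rw [if_neg (by omega)]
  | cons m ms ih =>
    intro l c hc
    have hspec := aPhase2Inner_spec s m lnm (PySem.List.pyRange |m| (mxn + 1) 1) l c hc
    simp only [] at hspec
    simp only [aPhase2, hspec, List.flatMap_cons]
    set F := (PySem.List.pyRange |m| (mxn + 1) 1).filter
      (fun n => decide (¬PySem.Int.mod (n - m) 2 = 1 ∧ [n, m] ∈ lnm)) with hF
    set k := (s - c).toNat with hk
    have hlen : (F.take k).length = min k F.length := List.length_take
    have hle : (F.take k).length ≤ k := by omega
    by_cases hb : c + ((F.take k).length : Int) > s - 1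
    · have heq : c + ((F.take k).length : Int) = s := by omega
      have hkF : k ≤ F.length := by omega
      have hrest : k - (F.map (fun n => (m, n))).length = 0 := by
        simp only [List.length_map]; omega
      rw [if_pos hb, List.take_append, hrest, List.take_zero, List.append_nil,
        ← List.map_take, List.map_map]
      simp only [List.length_map, if_pos heq]
      simp [Function.comp_def]
    · have hlt : c + ((F.take k).length : Int) < s := by omega
      have hFk : F.length ≤ k := by
        by_contra hcon
        have : (F.take k).length = k := by omega
        omega
      have htF : F.take k = F := List.take_of_length_le hFk
      rw [if_neg hb]
      rw [htF] at hlt ⊢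
      rw [ih (l ++ F.map fun n => [m, n]) (c + F.length) hlt]
      have hk' : (s - (c + (F.length : Int))).toNat = k - F.length := by omega
      simp only [List.take_append, List.length_map, ← List.map_take, htF, hk']
      simp only [List.map_append, List.map_map, List.length_append, List.append_assoc,
        Nat.cast_add, add_assoc, Function.comp_def]
      simp

lemma bRow_spec (s n : Int) (ms : List Int) : ∀ (acc : List (List Int)), (acc.length : Int) < s →
    bRow s n ms acc = acc ++ (ms.map (fun m => [n, m])).take ((s - acc.length).toNat) := by
  induction ms with
  | nil => intro acc hc; simp [bRow]
  | cons m ms ih =>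
    intro acc hc
    have htake : (s - acc.length).toNat = (s - (acc.length + 1)).toNat + 1 := by omega
    by_cases hb : ((acc ++ [[n, m]]).length : Int) = s
    · have h0 : (s - (acc.length + 1)).toNat = 0 := by
        simp at hb; omega
      simp only [bRow, if_pos hb, List.map_cons, htake, h0, List.take_succ_cons, List.take_zero]
    · have hc' : ((acc ++ [[n, m]]).length : Int) < s := by
        simp at hb ⊢; omega
      simp only [bRow, if_neg hb]
      rw [ih (acc ++ [[n, m]]) hc']
      simp only [List.map_cons, htake, List.take_succ_cons, List.append_assoc,
        List.singleton_append]
      congr 3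
      simp only [List.length_append, List.length_cons, List.length_nil]
      push_cast
      omega

lemma bLoop_spec (s : Int) (ns : List Int) : ∀ (acc : List (List Int)), (acc.length : Int) < s →
    bLoop s ns acc = acc ++
      ((ns.flatMap (fun n => (PySem.List.pyRange (-n) (n + 1) 2).map (fun m => (n, m)))).map pvPairL).take
        ((s - acc.length).toNat) := by
  induction ns with
  | nil => intro acc hc; simp [bLoop]
  | cons n ns ih =>
    intro acc hc
    have hspec := bRow_spec s n (PySem.List.pyRange (-n) (n + 1) 2) acc hc
    simp only [bLoop, hspec, List.flatMap_cons, List.map_append]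
    set R := (PySem.List.pyRange (-n) (n + 1) 2).map (fun m => [n, m]) with hR
    have hmapped : ((PySem.List.pyRange (-n) (n + 1) 2).map (fun m => (n, m))).map pvPairL = R := by
      rw [hR, List.map_map]
      apply List.map_congr_left; intro x _; simp [pvPairL]
    rw [hmapped]
    set k := (s - acc.length).toNat with hk
    have hlen : (R.take k).length = min k R.length := List.length_take
    by_cases hb : ((acc ++ R.take k).length : Int) = s
    · have hkR : k ≤ R.length := by simp at hb; omega
      rw [if_pos hb, List.take_append]
      have hrest : k - R.length = 0 := by omega
      rw [hrest, List.take_zero, List.append_nil]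
    · have hlt : ((acc ++ R.take k).length : Int) < s := by
        simp at hb ⊢
        have : (R.take k).length ≤ k := by omega
        omega
      have hRk : R.length ≤ k := by
        by_contra hcon
        have : (R.take k).length = k := by omega
        simp at hlt hb
        omega
      have htR : R.take k = R := List.take_of_length_le hRk
      rw [if_neg hb]
      rw [htR] at hlt ⊢
      rw [ih (acc ++ R) hlt]
      rw [List.take_append]
      have hk' : (s - ((acc ++ R).length : Int)).toNat = k - R.length := by
        simp; omega
      rw [hk', List.append_assoc, htR]


lemma pvFoldlMin_le {β : Type} (xs : List β) (f : β → Int) (init : Int) :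
    xs.foldl (fun acc y => min acc (f y)) init ≤ init ∧
      ∀ x ∈ xs, xs.foldl (fun acc y => min acc (f y)) init ≤ f x := by
  induction xs generalizing init with
  | nil => simp
  | cons y ys ih =>
    obtain ⟨h1, h2⟩ := ih (min init (f y))
    refine ⟨le_trans h1 (by omega), ?_⟩
    intro x hx
    rcases List.mem_cons.mp hx with hx | hx
    · subst hx; exact le_trans h1 (by omega)
    · exact h2 x hx

lemma length_le_sum_map (l : List Int) (f : Int → Nat) (h : ∀ x ∈ l, 1 ≤ f x) :
    l.length ≤ (l.map f).sum := by
  induction l with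
  | nil => simp
  | cons x xs ih =>
    simp only [List.length_cons, List.map_cons, List.sum_cons]
    have h1 := h x (List.mem_cons_self)
    have h2 := ih (fun y hy => h y (List.mem_cons_of_mem _ hy))
    omega

lemma row2_length {n : Int} (h : 0 ≤ n) :
    (PySem.List.pyRange (-n) (n + 1) 2).length = n.toNat + 1 := by
  rw [PySem.List.pyRange_of_pos (-n) (n + 1) (by norm_num : (0:Int) < 2)]
  have hif : (-n < n + 1) = True := by simp; omega
  have hcnt : ((n + 1 + n + 2 - 1) / 2).toNat = n.toNat + 1 := by omega
  simp [hif, hcnt]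

lemma pvFlat_len (s : Int) : s.toNat ≤ (pvFlat s).length := by
  rw [pvFlat, List.length_flatMap]
  have h1 : ∀ n ∈ PySem.List.pyRange 0 s 1,
      1 ≤ ((PySem.List.pyRange (-n) (n + 1) 2).map (fun m => (n, m))).length := by
    intro n hn
    have h0 : 0 ≤ n := by
      have := (PySem.List.mem_pyRange_one.mp hn).1; omega
    rw [List.length_map, row2_length h0]
    omega
  calc s.toNat = (PySem.List.pyRange 0 s 1).length := by
        rw [PySem.List.length_pyRange_one]; congr 1; omega
    _ ≤ _ := length_le_sum_map _ _ h1

lemma row2_pairwise (a b : Int) : (PySem.List.pyRange a b 2).Pairwise (· < ·) := by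
  rw [PySem.List.pyRange_of_pos a b (by norm_num : (0:Int) < 2)]
  refine List.Pairwise.map _ ?_ (List.pairwise_lt_range)
  intro i j hij
  omega

lemma flatMap_pairs_pairwise (ms : List Int) (g : Int → List Int)
    (h1 : ms.Pairwise (· < ·)) (h2 : ∀ m, (g m).Pairwise (· < ·)) :
    (ms.flatMap (fun m => (g m).map (fun n => (m, n)))).Pairwise pvLex := by
  rw [List.pairwise_flatMap]
  constructor
  · intro m _
    refine List.Pairwise.map _ ?_ (h2 m)
    intro x y hxy
    exact Or.inr ⟨rfl, hxy⟩
  · refine h1.imp_of_mem ?_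
    intro m1 m2 hm1 hm2 hlt x hx y hy
    obtain ⟨_, _, rfl⟩ := List.mem_map.mp hx
    obtain ⟨_, _, rfl⟩ := List.mem_map.mp hy
    exact Or.inl hlt

lemma pvLex_ne {p q : Int × Int} (h : pvLex p q) : p ≠ q := by
  intro he
  subst he
  rcases h with h | ⟨_, h2⟩
  exacts [lt_irrefl _ h, lt_irrefl _ h2]

lemma pvPairL_inj : Function.Injective pvPairL := by
  intro p q h
  simp only [pvPairL, List.cons.injEq, and_true] at h
  exact Prod.ext_iff.mpr ⟨h.1, h.2⟩

lemma pvSwapL_inj : Function.Injective (fun p : Int × Int => [p.2, p.1]) := by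
  intro p q h
  simp only [List.cons.injEq, and_true] at h
  exact Prod.ext_iff.mpr ⟨h.2, h.1⟩

lemma sorted2_eq_sorted_lex {α : Type} (xs : List α) (k1 k2 : α → Int) :
    PySem.List.sorted2 xs k1 k2 = PySem.List.sorted xs (fun x => toLex (k1 x, k2 x)) := by
  have hcmp : (fun (a b : α) => decide (k1 a < k1 b) || (!decide (k1 b < k1 a) && decide (k2 a < k2 b))) =
      (fun (a b : α) => decide (toLex (k1 a, k2 a) < toLex (k1 b, k2 b))) := by
    funext a b
    simp only [Prod.Lex.toLex_lt_toLex]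
    rcases lt_trichotomy (k1 a) (k1 b) with h | h | h
    · simp [h]
    · simp [h, lt_irrefl]
    · simp [h, lt_asymm h, h.ne']
  simp only [PySem.List.sorted2, PySem.List.sorted, Bool.false_eq_true, if_false, hcmp]


lemma generate_eq (s : Int) : generate_s_terms_list s = generate_s_terms_list_alt s := by
  by_cases hs : s ≤ 0
  · have h0 : PySem.List.pyRange 0 s 1 = [] := pyRange_nil_of_le hs
    have h1 : PySem.List.pyRange 0 1 1 = [0] := by decide
    have hif : ((0:Int) > s - 1) = True := by simp; omega
    simp [generate_s_terms_list, generate_s_terms_list_alt, h0, h1, aPhase1, aPhase2,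
      aPhase2Inner, bLoop, hif, PySem.List.sorted2, PySem.Int.mod]
  · push_neg at hs
    have hc0 : (0:Int) < s := hs
    -- phase 1 of A: rows with the parity filter are the step-2 rows
    have hflat : (PySem.List.pyRange 0 s 1).flatMap (fun n =>
        ((PySem.List.pyRange (-n) (n + 1) 1).filter
          (fun m => decide (¬PySem.Int.mod (n - m) 2 = 1))).map (fun m => (n, m)))
        = pvFlat s := by
      rw [pvFlat]
      apply List.flatMap_congr
      intro n hn
      rw [row_filter_eq (by have := (PySem.List.mem_pyRange_one.mp hn).1; omega)]
    have h1 := aPhase1_spec s (PySem.List.pyRange 0 s 1) [] 0 0 0 0 hc0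
    simp only [hflat, List.nil_append, sub_zero, zero_add] at h1
    have hTlen : (pvT s).length = s.toNat := by
      rw [pvT, List.length_take]
      have := pvFlat_len s; omega
    have hTlenInt : ((pvT s).length : Int) = s := by rw [hTlen]; omega
    rw [show (pvFlat s).take s.toNat = pvT s from rfl] at h1
    rw [if_pos hTlenInt] at h1
    -- B phase 1
    have hB := bLoop_spec s (PySem.List.pyRange 0 s 1) [] (by simpa using hc0)
    simp only [List.nil_append, List.length_nil, Nat.cast_zero, sub_zero,
      ← List.map_take] at hB
    rw [show (PySem.List.pyRange 0 s 1).flatMap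
        (fun n => (PySem.List.pyRange (-n) (n + 1) 2).map (fun m => (n, m))) = pvFlat s from rfl,
      show (pvFlat s).take s.toNat = pvT s from rfl] at hB
    -- facts about T
    have hTpw : (pvT s).Pairwise pvLex := by
      apply List.Pairwise.sublist (List.take_sublist _ _)
      exact flatMap_pairs_pairwise _ _ (PySem.List.pairwise_lt_pyRange_one 0 s)
        (fun n => row2_pairwise _ _)
    have hTnd : (pvT s).Nodup := hTpw.imp pvLex_ne
    have hLnd : ((pvT s).map pvPairL).Nodup := hTnd.map pvPairL_inj
    have hTmem : ∀ p ∈ pvT s, 0 ≤ p.1 ∧ -p.1 ≤ p.2 ∧ p.2 ≤ p.1 ∧ 2 ∣ p.2 + p.1 := by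
      intro p hp
      have hp' : p ∈ pvFlat s := List.mem_of_mem_take hp
      rw [pvFlat] at hp'
      obtain ⟨n, hn, hmem⟩ := List.mem_flatMap.mp hp'
      obtain ⟨m, hm, rfl⟩ := List.mem_map.mp hmem
      have h0n : 0 ≤ n := (PySem.List.mem_pyRange_one.mp hn).1
      have hmm := (PySem.List.mem_pyRange_iff_of_pos (by norm_num : (0:Int) < 2) m).mp hm
      refine ⟨h0n, by omega, by omega, ?_⟩
      have := hmm.2.2
      omega
    -- the fold bounds
    have hmxn := PySem.List.le_foldl_max_int (pvT s) (fun p => p.1) 0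
    have hmxm := PySem.List.le_foldl_max_int (pvT s) (fun p => p.2) 0
    have hmnm := pvFoldlMin_le (pvT s) (fun p => p.2) 0
    set mxn := (pvT s).foldl (fun acc p => max acc p.1) 0 with hmxndef
    set mxm := (pvT s).foldl (fun acc p => max acc p.2) 0 with hmxmdef
    set mnm := (pvT s).foldl (fun acc p => min acc p.2) 0 with hmnmdef
    set L := (pvT s).map pvPairL with hLdef
    -- phase 2 of A
    have h2 := aPhase2_spec s mxn L (PySem.List.pyRange mnm (mxm + 1) 1) [] 0 hc0
    simp only [List.nil_append, sub_zero, zero_add] at h2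
    set G := (PySem.List.pyRange mnm (mxm + 1) 1).flatMap (fun m =>
      ((PySem.List.pyRange |m| (mxn + 1) 1).filter
        (fun n => decide (¬PySem.Int.mod (n - m) 2 = 1 ∧ [n, m] ∈ L))).map (fun n => (m, n)))
      with hGdef
    have hGpw : G.Pairwise pvLex := by
      rw [hGdef]
      exact flatMap_pairs_pairwise _ _ (PySem.List.pairwise_lt_pyRange_one _ _)
        (fun m => (PySem.List.pairwise_lt_pyRange_one _ _).filter _)
    have hGnd : G.Nodup := hGpw.imp pvLex_ne
    have hmemiff : ∀ q, q ∈ G.map (fun p : Int × Int => [p.2, p.1]) ↔ q ∈ L := by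
      intro q
      constructor
      · intro hq
        obtain ⟨p, hp, rfl⟩ := List.mem_map.mp hq
        rw [hGdef] at hp
        obtain ⟨m, _, hmem⟩ := List.mem_flatMap.mp hp
        obtain ⟨n, hn, rfl⟩ := List.mem_map.mp hmem
        have := List.mem_filter.mp hn
        exact (decide_eq_true_eq.mp this.2).2
      · intro hq
        rw [hLdef] at hq
        obtain ⟨p, hp, rfl⟩ := List.mem_map.mp hq
        obtain ⟨hp1, hp2, hp3, hp4⟩ := hTmem p hp
        have hb1 : mnm ≤ p.2 := hmnm.2 p hp
        have hb2 : p.2 ≤ mxm := hmxm.2 p hp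
        have hb3 : p.1 ≤ mxn := hmxn.2 p hp
        rw [List.mem_map]
        refine ⟨(p.2, p.1), ?_, by simp [pvPairL]⟩
        rw [hGdef, List.mem_flatMap]
        refine ⟨p.2, PySem.List.mem_pyRange_one.mpr ⟨hb1, by omega⟩, ?_⟩
        rw [List.mem_map]
        refine ⟨p.1, ?_, rfl⟩
        rw [List.mem_filter]
        refine ⟨PySem.List.mem_pyRange_one.mpr ⟨by rw [abs_le]; omega, by omega⟩, ?_⟩
        rw [decide_eq_true_eq]
        constructor
        · simp
          omega
        · rw [hLdef]
          exact List.mem_map.mpr ⟨p, hp, rfl⟩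
    have hperm : (G.map (fun p : Int × Int => [p.2, p.1])).Perm L :=
      (List.perm_ext_iff_of_nodup (hGnd.map pvSwapL_inj) hLnd).mpr hmemiff
    have hGlen : (G.length : Int) = s := by
      have hl := hperm.length_eq
      rw [List.length_map, hLdef, List.length_map] at hl
      omega
    have hGtake : G.take s.toNat = G := List.take_of_length_le (by omega)
    have hsorted : PySem.List.sorted2 L (fun p => PySem.List.pyGetD p 1 0)
        (fun p => PySem.List.pyGetD p 0 0) = G.map (fun p : Int × Int => [p.2, p.1]) := by
      rw [sorted2_eq_sorted_lex]
      apply PySem.List.sorted_eq_of_perm_of_pairwise_lt _ _ _ hperm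
      rw [List.pairwise_map]
      refine hGpw.imp ?_
      intro p q hpq
      simp only [PySem.List.pyGetD_ofNat', List.getD]
      simp only [Prod.Lex.toLex_lt_toLex]
      simpa using hpq
    -- assemble
    simp only [generate_s_terms_list, generate_s_terms_list_alt, h1, hB, h2, hsorted, hGtake]
    rw [List.map_map]
    refine congrArg₂ Prod.mk rfl ?_
    apply List.map_congr_left
    intro p _
    simp [PySem.List.pyGetD_ofNat', Function.comp]

-- ===== VERDICT (by name: the statement is the Claim_ definition above) =====
theorem generate_s_terms_list_spec : Claim_equal_generate_s_terms_list := by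
  intro s _
  unfold Spec_generate_s_terms_list
  exact generate_eq s
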